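-- pv_equiv track=rewrite | github.com/lorenzo-rovigatti/oxDNA | analysis/src/oxDNA_analysis_tools/UTILS/mmcif.py | tokenize_cif
-- ===== SOURCE A (Python) =====
-- from typing import List, Dict, Tuple, TextIO
--
-- def tokenize_cif(text: str) -> List[str]:
--     """Return a flat list of CIF string tokens.
--
--     Handles bare tokens, single-quoted strings, double-quoted strings,
--     semicolon-delimited multi-line values, and #-comments.
--     """
--     tokens: List[str] = []
--     i, n = 0, len(text)
--     while i < n:
--         c = text[i]
--         if c in ' \t\r\n':
--             i += 1
--         elif c == '#':                              # comment to EOL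
--             while i < n and text[i] != '\n':
--                 i += 1
--         elif c == ';' and (i == 0 or text[i - 1] == '\n'):   # semicolon block
--             i += 1
--             start = i
--             while i < n:
--                 if text[i] == '\n' and i + 1 < n and text[i + 1] == ';':
--                     break
--                 i += 1
--             tokens.append(text[start:i].strip())
--             i += 2                                  # skip \n;
--         elif c == "'":                              # single-quoted string
--             i += 1
--             start = i
--             while i < n:
--                 if text[i] == "'" and (i + 1 >= n or text[i + 1] in ' \t\r\n'):
--                     break
--                 i += 1
--             tokens.append(text[start:i])
--             i += 1
--         elif c == '"':                              # double-quoted string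
--             i += 1
--             start = i
--             while i < n and text[i] != '"':
--                 i += 1
--             tokens.append(text[start:i])
--             i += 1
--         else:                                       # bare token
--             start = i
--             while i < n and text[i] not in ' \t\r\n':
--                 i += 1
--             tokens.append(text[start:i])
--     return tokens
-- ===== SOURCE B (Python) =====
-- def tokenize_cif(text):
--     """Return a flat list of CIF string tokens.
--
--     Single-pass finite-state tokenizer: one explicit mode per construct
--     (whitespace, comment, bare token, quoted strings, semicolon block)
--     instead of index arithmetic with nested scanning loops.
--     """
--     tokens = []
--     mode = 'ws'       # between tokens
--     bol = True        # current char is at beginning of a line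
--     buf = []          # characters of the token being built
--     for c in text:
--         if mode == 'ws':
--             if c in ' \t\r\n':
--                 bol = c == '\n'
--             elif c == '#':
--                 mode = 'comment'
--             elif c == ';' and bol:
--                 mode, buf = 'semi', []
--             elif c == "'":
--                 mode, buf = 'squote', []
--             elif c == '"':
--                 mode, buf = 'dquote', []
--             else:
--                 mode, buf = 'bare', [c]
--         elif mode == 'comment':
--             if c == '\n':
--                 mode, bol = 'ws', True
--         elif mode == 'bare':
--             if c in ' \t\r\n':
--                 tokens.append(''.join(buf))
--                 mode, bol, buf = 'ws', c == '\n', []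
--             else:
--                 buf.append(c)
--         elif mode == 'squote':
--             if c == "'":
--                 mode = 'squoteq'      # quote seen; closes only before whitespace/EOF
--             else:
--                 buf.append(c)
--         elif mode == 'squoteq':
--             if c in ' \t\r\n':
--                 tokens.append(''.join(buf))
--                 mode, bol, buf = 'ws', c == '\n', []
--             elif c == "'":
--                 buf.append("'")       # previous quote was content; this one pends
--             else:
--                 buf.append("'")
--                 buf.append(c)
--                 mode = 'squote'
--         elif mode == 'dquote':
--             if c == '"':
--                 tokens.append(''.join(buf))
--                 mode, bol, buf = 'ws', False, []
--             else:
--                 buf.append(c)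
--         elif mode == 'semi':
--             if c == '\n':
--                 mode = 'seminl'       # newline seen; ';' next would terminate
--             else:
--                 buf.append(c)
--         else:  # seminl
--             if c == ';':
--                 tokens.append(''.join(buf).strip())
--                 mode, bol, buf = 'ws', False, []
--             elif c == '\n':
--                 buf.append('\n')      # previous newline was content; this one pends
--             else:
--                 buf.append('\n')
--                 buf.append(c)
--                 mode = 'semi'
--     if mode in ('bare', 'squote', 'squoteq', 'dquote'):
--         tokens.append(''.join(buf))
--     elif mode in ('semi', 'seminl'):
--         tokens.append(''.join(buf).strip())
--     return tokens
-- ===== Notes on version B (the rewrite author's own statement) =====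
-- stated objective: alternative
-- what changed: Replaced the index-based dispatcher with nested scanning loops and string slicing by a single-pass finite-state machine: one fold over the characters with an explicit mode (ws/comment/bare/squote/squoteq/dquote/semi/seminl), a line-start flag and a character buffer, so the inner scans and the slice arithmetic disappear.
import Mathlib
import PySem

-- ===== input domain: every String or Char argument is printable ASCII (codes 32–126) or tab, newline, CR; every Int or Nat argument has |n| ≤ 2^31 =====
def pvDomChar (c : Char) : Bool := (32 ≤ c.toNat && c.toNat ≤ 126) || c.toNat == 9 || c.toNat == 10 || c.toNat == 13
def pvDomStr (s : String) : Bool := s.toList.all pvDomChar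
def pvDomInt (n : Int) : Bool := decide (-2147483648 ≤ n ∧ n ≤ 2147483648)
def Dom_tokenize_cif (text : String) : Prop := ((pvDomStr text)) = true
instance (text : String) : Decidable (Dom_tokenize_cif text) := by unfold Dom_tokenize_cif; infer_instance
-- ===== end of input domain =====

-- B re-implements A's index/slice tokenizer as a single-pass finite-state machine over the
-- characters (alternative decomposition, same O(n) cost); proved to return the same token list.

-- ===== PORT A =====
-- `c in ' \t\r\n'` (shared character class)
def wsChar (c : Char) : Bool := c == ' ' || c == '\t' || c == '\r' || c == '\n'

-- text[start:j] on the char list (0 ≤ start ≤ j): exact for the in-range slices A takes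
def pvSlice (cs : List Char) (i j : Nat) : List Char := (cs.drop i).take (j - i)

-- `while i < n and text[i] != '\n': i += 1`
def commentEnd (cs : List Char) (n i : Nat) : Nat :=
  if h : i < n then (if cs.getD i ' ' = '\n' then i else commentEnd cs n (i + 1)) else i
termination_by n - i

-- semicolon-block scan: `while i < n: if text[i]=='\n' and i+1<n and text[i+1]==';': break; i+=1`
def semiEnd (cs : List Char) (n i : Nat) : Nat :=
  if h : i < n then
    (if cs.getD i ' ' = '\n' ∧ i + 1 < n ∧ cs.getD (i + 1) ' ' = ';' then i else semiEnd cs n (i + 1))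
  else i
termination_by n - i

-- single-quote scan: break on `'` followed by whitespace or EOF
def squoteEnd (cs : List Char) (n i : Nat) : Nat :=
  if h : i < n then
    (if cs.getD i ' ' = '\'' ∧ (n ≤ i + 1 ∨ wsChar (cs.getD (i + 1) ' ')) then i else squoteEnd cs n (i + 1))
  else i
termination_by n - i

-- `while i < n and text[i] != '"': i += 1`
def dquoteEnd (cs : List Char) (n i : Nat) : Nat :=
  if h : i < n then (if cs.getD i ' ' = '"' then i else dquoteEnd cs n (i + 1)) else i
termination_by n - i

-- `while i < n and text[i] not in ' \t\r\n': i += 1`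
def bareEnd (cs : List Char) (n i : Nat) : Nat :=
  if h : i < n then (if wsChar (cs.getD i ' ') then i else bareEnd cs n (i + 1)) else i
termination_by n - i

theorem commentEnd_ge (cs : List Char) (n i : Nat) : i ≤ commentEnd cs n i := by
  fun_induction commentEnd <;> omega

theorem semiEnd_ge (cs : List Char) (n i : Nat) : i ≤ semiEnd cs n i := by
  fun_induction semiEnd <;> omega

theorem squoteEnd_ge (cs : List Char) (n i : Nat) : i ≤ squoteEnd cs n i := by
  fun_induction squoteEnd <;> omega

theorem dquoteEnd_ge (cs : List Char) (n i : Nat) : i ≤ dquoteEnd cs n i := by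
  fun_induction dquoteEnd <;> omega

theorem bareEnd_ge (cs : List Char) (n i : Nat) : i ≤ bareEnd cs n i := by
  fun_induction bareEnd <;> omega

-- A's outer `while i < n` dispatch loop
def loopA (cs : List Char) (n i : Nat) (tokens : List String) : List String :=
  if h : i < n then
    if hw : wsChar (cs.getD i ' ') then loopA cs n (i + 1) tokens
    else if hc : cs.getD i ' ' = '#' then loopA cs n (commentEnd cs n i) tokens
    else if cs.getD i ' ' = ';' ∧ (i = 0 ∨ cs.getD (i - 1) ' ' = '\n') then
      loopA cs n (semiEnd cs n (i + 1) + 2)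
        (tokens ++ [PySem.Str.strip (String.ofList (pvSlice cs (i + 1) (semiEnd cs n (i + 1))))])
    else if cs.getD i ' ' = '\'' then
      loopA cs n (squoteEnd cs n (i + 1) + 1)
        (tokens ++ [String.ofList (pvSlice cs (i + 1) (squoteEnd cs n (i + 1)))])
    else if cs.getD i ' ' = '"' then
      loopA cs n (dquoteEnd cs n (i + 1) + 1)
        (tokens ++ [String.ofList (pvSlice cs (i + 1) (dquoteEnd cs n (i + 1)))])
    else
      loopA cs n (bareEnd cs n i) (tokens ++ [String.ofList (pvSlice cs i (bareEnd cs n i))])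
  else tokens
termination_by n - i
decreasing_by
  · omega
  · have h1 : commentEnd cs n i = commentEnd cs n (i + 1) := by
      rw [commentEnd, dif_pos h, if_neg (by simp only [hc]; decide)]
    have := commentEnd_ge cs n (i + 1); omega
  · have := semiEnd_ge cs n (i + 1); omega
  · have := squoteEnd_ge cs n (i + 1); omega
  · have := dquoteEnd_ge cs n (i + 1); omega
  · have h1 : bareEnd cs n i = bareEnd cs n (i + 1) := by
      rw [bareEnd, dif_pos h, if_neg hw]
    have := bareEnd_ge cs n (i + 1); omega

def tokenize_cif (text : String) : List String :=
  loopA text.toList text.toList.length 0 []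

-- ===== PORT B =====
inductive Mode where
  | ws | comment | bare | squote | squoteq | dquote | semi | seminl
deriving DecidableEq, Repr

structure PState where
  tokens : List String
  mode : Mode
  bol : Bool
  buf : List Char
deriving Repr

-- one character of the finite-state tokenizer
def stepB (s : PState) (c : Char) : PState :=
  match s with
  | ⟨tk, .ws, b, buf⟩ =>
    if wsChar c then ⟨tk, .ws, c == '\n', buf⟩
    else if c == '#' then ⟨tk, .comment, b, buf⟩
    else if c == ';' && b then ⟨tk, .semi, b, []⟩
    else if c == '\'' then ⟨tk, .squote, b, []⟩
    else if c == '"' then ⟨tk, .dquote, b, []⟩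
    else ⟨tk, .bare, b, [c]⟩
  | ⟨tk, .comment, b, buf⟩ => if c == '\n' then ⟨tk, .ws, true, buf⟩ else ⟨tk, .comment, b, buf⟩
  | ⟨tk, .bare, b, buf⟩ =>
    if wsChar c then ⟨tk ++ [String.ofList buf], .ws, c == '\n', []⟩ else ⟨tk, .bare, b, buf ++ [c]⟩
  | ⟨tk, .squote, b, buf⟩ =>
    if c == '\'' then ⟨tk, .squoteq, b, buf⟩ else ⟨tk, .squote, b, buf ++ [c]⟩
  | ⟨tk, .squoteq, b, buf⟩ =>
    if wsChar c then ⟨tk ++ [String.ofList buf], .ws, c == '\n', []⟩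
    else if c == '\'' then ⟨tk, .squoteq, b, buf ++ ['\'']⟩
    else ⟨tk, .squote, b, buf ++ ['\'', c]⟩
  | ⟨tk, .dquote, b, buf⟩ =>
    if c == '"' then ⟨tk ++ [String.ofList buf], .ws, false, []⟩ else ⟨tk, .dquote, b, buf ++ [c]⟩
  | ⟨tk, .semi, b, buf⟩ => if c == '\n' then ⟨tk, .seminl, b, buf⟩ else ⟨tk, .semi, b, buf ++ [c]⟩
  | ⟨tk, .seminl, b, buf⟩ =>
    if c == ';' then ⟨tk ++ [PySem.Str.strip (String.ofList buf)], .ws, false, []⟩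
    else if c == '\n' then ⟨tk, .seminl, b, buf ++ ['\n']⟩
    else ⟨tk, .semi, b, buf ++ ['\n', c]⟩

-- end-of-input: flush the pending token
def finishB (s : PState) : List String :=
  match s with
  | ⟨tk, .ws, _, _⟩ => tk
  | ⟨tk, .comment, _, _⟩ => tk
  | ⟨tk, .bare, _, buf⟩ => tk ++ [String.ofList buf]
  | ⟨tk, .squote, _, buf⟩ => tk ++ [String.ofList buf]
  | ⟨tk, .squoteq, _, buf⟩ => tk ++ [String.ofList buf]
  | ⟨tk, .dquote, _, buf⟩ => tk ++ [String.ofList buf]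
  | ⟨tk, .semi, _, buf⟩ => tk ++ [PySem.Str.strip (String.ofList buf)]
  | ⟨tk, .seminl, _, buf⟩ => tk ++ [PySem.Str.strip (String.ofList buf)]

def tokenize_cif_alt (text : String) : List String :=
  finishB (text.toList.foldl stepB ⟨[], .ws, true, []⟩)

-- ===== PRECONDITION & SPEC =====
def Spec_tokenize_cif (text : String) (out : List String) : Prop := out = tokenize_cif_alt text
instance (text : String) (out : List String) : Decidable (Spec_tokenize_cif text out) := by unfold Spec_tokenize_cif; infer_instance

-- ===== CLAIM (what is proved, stated in full; the proofs are below) =====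
def Claim_equal_tokenize_cif : Prop := ∀ (text : String), Dom_tokenize_cif text → Spec_tokenize_cif text (tokenize_cif text)

-- ===== LEMMAS AND PROOFS =====

-- the line-start flag B carries in ws mode, expressed by A's positional test
def bolA (cs : List Char) (i : Nat) : Bool := decide (i = 0 ∨ cs.getD (i - 1) ' ' = '\n')

-- B's run from position i in the between-tokens state
def Rrun (cs : List Char) (i : Nat) : List String :=
  finishB ((cs.drop i).foldl stepB ⟨[], .ws, bolA cs i, []⟩)

theorem drop_cons_getD {cs : List Char} {i : Nat} (h : i < cs.length) :
    cs.drop i = cs.getD i ' ' :: cs.drop (i + 1) := by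
  rw [List.getD_eq_getElem cs ' ' h, List.drop_eq_getElem_cons h]

theorem pvSlice_nil (cs : List Char) (i : Nat) : pvSlice cs i i = [] := by
  simp [pvSlice]

theorem pvSlice_cons {cs : List Char} {i j : Nat} (h : i < cs.length) (hj : i + 1 ≤ j) :
    pvSlice cs i j = cs.getD i ' ' :: pvSlice cs (i + 1) j := by
  rw [pvSlice, pvSlice, drop_cons_getD h]
  rw [show j - i = (j - (i + 1)) + 1 by omega]
  simp

theorem Rrun_ge {cs : List Char} {i : Nat} (h : cs.length ≤ i) : Rrun cs i = [] := by
  simp [Rrun, List.drop_eq_nil_of_le h, finishB]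

theorem bolA_succ (cs : List Char) (i : Nat) :
    bolA cs (i + 1) = decide (cs.getD i ' ' = '\n') := by
  simp [bolA]

theorem finishB_prefix (T : List String) (s : PState) :
    finishB ⟨T ++ s.tokens, s.mode, s.bol, s.buf⟩ = T ++ finishB s := by
  obtain ⟨tk, m, b, buf⟩ := s; cases m <;> simp [finishB]

theorem step_prefix (T : List String) (m : Mode) (b : Bool) (buf : List Char) (c : Char) :
    stepB ⟨T, m, b, buf⟩ c =
      ⟨T ++ (stepB ⟨[], m, b, buf⟩ c).tokens, (stepB ⟨[], m, b, buf⟩ c).mode,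
        (stepB ⟨[], m, b, buf⟩ c).bol, (stepB ⟨[], m, b, buf⟩ c).buf⟩ := by
  cases m <;> simp only [stepB] <;> split_ifs <;> simp

theorem foldl_prefix (l : List Char) : ∀ (T : List String) (m : Mode) (b : Bool) (buf : List Char),
    l.foldl stepB ⟨T, m, b, buf⟩ =
      ⟨T ++ (l.foldl stepB ⟨[], m, b, buf⟩).tokens, (l.foldl stepB ⟨[], m, b, buf⟩).mode,
        (l.foldl stepB ⟨[], m, b, buf⟩).bol, (l.foldl stepB ⟨[], m, b, buf⟩).buf⟩ := by
  induction l with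
  | nil => intro T m b buf; simp
  | cons c l ih =>
    intro T m b buf
    simp only [List.foldl_cons]
    rw [step_prefix]
    obtain ⟨t1, m1, b1, buf1⟩ : PState := stepB ⟨[], m, b, buf⟩ c
    rw [ih (T ++ t1) m1 b1 buf1, ih t1 m1 b1 buf1]
    simp

theorem finish_foldl_prefix (l : List Char) (T : List String) (m : Mode) (b : Bool) (buf : List Char) :
    finishB (l.foldl stepB ⟨T, m, b, buf⟩) = T ++ finishB (l.foldl stepB ⟨[], m, b, buf⟩) := by
  rw [foldl_prefix]; exact finishB_prefix T _

-- in ws/comment mode the buffer is dead: every path that uses it first resets it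
theorem ws_comment_buf (l : List Char) : ∀ (T : List String) (b : Bool) (buf buf' : List Char),
    (finishB (l.foldl stepB ⟨T, .ws, b, buf⟩) = finishB (l.foldl stepB ⟨T, .ws, b, buf'⟩)) ∧
    (finishB (l.foldl stepB ⟨T, .comment, b, buf⟩) = finishB (l.foldl stepB ⟨T, .comment, b, buf'⟩)) := by
  induction l with
  | nil => intro T b buf buf'; simp [finishB]
  | cons c l ih =>
    intro T b buf buf'
    constructor
    · simp only [List.foldl_cons, stepB]
      split_ifs with h1 h2 h3 h4 h5
      · exact (ih T (c == '\n') buf buf').1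
      · exact (ih T b buf buf').2
      · rfl
      · rfl
      · rfl
      · rfl
    · simp only [List.foldl_cons, stepB]
      split_ifs with h1
      · exact (ih T true buf buf').1
      · exact (ih T b buf buf').2

theorem strip_chars_append_nl (l : List Char) :
    PySem.Chars.strip (l ++ ['\n']) = PySem.Chars.strip l := by
  unfold PySem.Chars.strip PySem.Chars.lstrip PySem.Chars.rstrip
  rw [List.dropWhile_append]
  split
  · rename_i h; rw [List.isEmpty_iff] at h; rw [h]; decide
  · rw [List.reverse_append]
    simp [show PySem.Chars.isspace '\n' = true from by decide]

theorem strip_mk_append_nl (l : List Char) :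
    PySem.Str.strip (String.ofList (l ++ ['\n'])) = PySem.Str.strip (String.ofList l) := by
  apply String.toList_inj.mp
  rw [PySem.Str.toList_strip, PySem.Str.toList_strip, String.toList_ofList, String.toList_ofList]
  exact strip_chars_append_nl l

theorem commentEnd_stop (cs : List Char) (n i : Nat) (h : commentEnd cs n i < n) :
    cs.getD (commentEnd cs n i) ' ' = '\n' := by
  fun_induction commentEnd with
  | case1 i h1 h2 => exact h2
  | case2 i h1 h2 ih => exact ih h
  | case3 i h1 => omega

theorem Rrun_ws_step {cs : List Char} {i : Nat} (h : i < cs.length)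
    (hw : wsChar (cs.getD i ' ')) : Rrun cs i = Rrun cs (i + 1) := by
  rw [Rrun, Rrun, drop_cons_getD h]
  simp only [List.foldl_cons, stepB, if_pos hw]
  rw [bolA_succ]
  congr 2

theorem char_beq_decide (x y : Char) : (x == y) = decide (x = y) := by
  by_cases h : x = y <;> simp [h]

-- landing in the between-tokens state at position i with the right line-start flag is Rrun
theorem to_Rrun (cs : List Char) (i : Nat) (T : List String) (b : Bool) (buf : List Char)
    (hb : b = bolA cs i) :
    finishB ((cs.drop i).foldl stepB ⟨T, .ws, b, buf⟩) = T ++ Rrun cs i := by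
  subst hb
  rw [finish_foldl_prefix, Rrun, (ws_comment_buf (cs.drop i) [] (bolA cs i) buf []).1]

-- comment: B skips to the newline and resumes between tokens after it, emitting nothing
theorem L_comment (cs : List Char) : ∀ (k i : Nat), cs.length - i ≤ k →
    ∀ (T : List String) (b : Bool) (buf : List Char),
    finishB ((cs.drop i).foldl stepB ⟨T, .comment, b, buf⟩) =
      T ++ Rrun cs (commentEnd cs cs.length i + 1) := by
  intro k
  induction k with
  | zero =>
    intro i hk T b buf
    rw [List.drop_eq_nil_of_le (by omega), commentEnd, dif_neg (by omega)]
    rw [Rrun_ge (by omega)]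
    simp [finishB]
  | succ k ih =>
    intro i hk T b buf
    by_cases h : i < cs.length
    · rw [drop_cons_getD h]
      simp only [List.foldl_cons, stepB]
      by_cases hc : cs.getD i ' ' = '\n'
      · rw [if_pos (by simp only [beq_iff_eq]; exact hc), commentEnd, dif_pos h, if_pos hc]
        exact to_Rrun cs (i + 1) T true buf (by rw [bolA_succ, hc]; decide)
      · rw [if_neg (by simp only [beq_iff_eq]; exact hc), commentEnd, dif_pos h, if_neg hc]
        exact ih (i + 1) (by omega) T b buf
    · rw [List.drop_eq_nil_of_le (by omega), commentEnd, dif_neg h]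
      rw [Rrun_ge (by omega)]
      simp [finishB]

-- bare token: B flushes at the first whitespace (or EOF) and resumes there
theorem L_bare (cs : List Char) : ∀ (k i : Nat), cs.length - i ≤ k →
    ∀ (T : List String) (b : Bool) (buf : List Char),
    finishB ((cs.drop i).foldl stepB ⟨T, .bare, b, buf⟩) =
      T ++ [String.ofList (buf ++ pvSlice cs i (bareEnd cs cs.length i))] ++ Rrun cs (bareEnd cs cs.length i) := by
  intro k
  induction k with
  | zero =>
    intro i hk T b buf
    rw [List.drop_eq_nil_of_le (by omega), bareEnd, dif_neg (by omega)]
    rw [Rrun_ge (by omega)]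
    simp [finishB, pvSlice_nil]
  | succ k ih =>
    intro i hk T b buf
    by_cases h : i < cs.length
    · rw [drop_cons_getD h]
      simp only [List.foldl_cons, stepB]
      by_cases hw : wsChar (cs.getD i ' ')
      · rw [if_pos hw]
        rw [to_Rrun cs (i + 1) (T ++ [String.ofList buf]) _ [] (by rw [bolA_succ, char_beq_decide])]
        rw [show bareEnd cs cs.length i = i by rw [bareEnd, dif_pos h, if_pos hw]]
        rw [← Rrun_ws_step h hw, pvSlice_nil]
        simp
      · rw [if_neg hw]
        rw [show bareEnd cs cs.length i = bareEnd cs cs.length (i + 1) by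
          rw [bareEnd, dif_pos h, if_neg hw]]
        rw [ih (i + 1) (by omega) T b (buf ++ [cs.getD i ' '])]
        rw [pvSlice_cons h (bareEnd_ge cs cs.length (i + 1))]
        simp
    · rw [List.drop_eq_nil_of_le (by omega), bareEnd, dif_neg h]
      rw [Rrun_ge (by omega)]
      simp [finishB, pvSlice_nil]

-- double-quoted: B flushes at the closing quote (or EOF) and resumes after it
theorem L_dquote (cs : List Char) : ∀ (k i : Nat), cs.length - i ≤ k →
    ∀ (T : List String) (b : Bool) (buf : List Char),
    finishB ((cs.drop i).foldl stepB ⟨T, .dquote, b, buf⟩) =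
      T ++ [String.ofList (buf ++ pvSlice cs i (dquoteEnd cs cs.length i))] ++ Rrun cs (dquoteEnd cs cs.length i + 1) := by
  intro k
  induction k with
  | zero =>
    intro i hk T b buf
    rw [List.drop_eq_nil_of_le (by omega), dquoteEnd, dif_neg (by omega)]
    rw [Rrun_ge (by omega)]
    simp [finishB, pvSlice_nil]
  | succ k ih =>
    intro i hk T b buf
    by_cases h : i < cs.length
    · rw [drop_cons_getD h]
      simp only [List.foldl_cons, stepB]
      by_cases hc : cs.getD i ' ' = '"'
      · rw [if_pos (by simp only [beq_iff_eq]; exact hc)]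
        rw [to_Rrun cs (i + 1) (T ++ [String.ofList buf]) _ [] (by rw [bolA_succ, hc]; decide)]
        rw [show dquoteEnd cs cs.length i = i by rw [dquoteEnd, dif_pos h, if_pos hc]]
        rw [pvSlice_nil]
        simp
      · rw [if_neg (by simp only [beq_iff_eq]; exact hc)]
        rw [show dquoteEnd cs cs.length i = dquoteEnd cs cs.length (i + 1) by
          rw [dquoteEnd, dif_pos h, if_neg hc]]
        rw [ih (i + 1) (by omega) T b (buf ++ [cs.getD i ' '])]
        rw [pvSlice_cons h (dquoteEnd_ge cs cs.length (i + 1))]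
        simp
    · rw [List.drop_eq_nil_of_le (by omega), dquoteEnd, dif_neg h]
      rw [Rrun_ge (by omega)]
      simp [finishB, pvSlice_nil]

-- single-quoted (squote) and its pending-quote companion (squoteq), proved together
theorem L_squote_pair (cs : List Char) : ∀ (k i : Nat), cs.length - i ≤ k →
    (∀ (T : List String) (b : Bool) (buf : List Char),
      finishB ((cs.drop i).foldl stepB ⟨T, .squote, b, buf⟩) =
        T ++ [String.ofList (buf ++ pvSlice cs i (squoteEnd cs cs.length i))] ++ Rrun cs (squoteEnd cs cs.length i + 1)) ∧
    (∀ (T : List String) (b : Bool) (buf : List Char),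
      finishB ((cs.drop i).foldl stepB ⟨T, .squoteq, b, buf⟩) =
        if i < cs.length ∧ ¬ wsChar (cs.getD i ' ') then
          T ++ [String.ofList (buf ++ '\'' :: pvSlice cs i (squoteEnd cs cs.length i))] ++ Rrun cs (squoteEnd cs cs.length i + 1)
        else T ++ [String.ofList buf] ++ Rrun cs i) := by
  intro k
  induction k with
  | zero =>
    intro i hk
    constructor
    · intro T b buf
      rw [List.drop_eq_nil_of_le (by omega), squoteEnd, dif_neg (by omega)]
      rw [Rrun_ge (by omega), pvSlice_nil]
      simp [finishB]
    · intro T b buf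
      rw [List.drop_eq_nil_of_le (by omega), if_neg (by omega)]
      rw [Rrun_ge (by omega)]
      simp [finishB]
  | succ k ih =>
    intro i hk
    by_cases h : i < cs.length
    constructor
    · -- squote
      intro T b buf
      rw [drop_cons_getD h]
      simp only [List.foldl_cons, stepB]
      by_cases hq : cs.getD i ' ' = '\''
      · rw [if_pos (by simp only [beq_iff_eq]; exact hq)]
        by_cases hC : i + 1 < cs.length ∧ ¬ wsChar (cs.getD (i + 1) ' ')
        · rw [(ih (i + 1) (by omega)).2 T b buf, if_pos hC]
          rw [show squoteEnd cs cs.length i = squoteEnd cs cs.length (i + 1) by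
            rw [squoteEnd, dif_pos h, if_neg (by rintro ⟨-, h2 | h2⟩ <;> [omega; exact hC.2 h2])]]
          rw [pvSlice_cons h (squoteEnd_ge cs cs.length (i + 1)), hq]
        · rw [(ih (i + 1) (by omega)).2 T b buf, if_neg hC]
          have hor : cs.length ≤ i + 1 ∨ wsChar (cs.getD (i + 1) ' ') = true := by
            rcases Nat.lt_or_ge (i + 1) cs.length with hlt | hge
            · by_cases hw2 : wsChar (cs.getD (i + 1) ' ') = true
              · exact Or.inr hw2
              · exact absurd ⟨hlt, hw2⟩ hC
            · exact Or.inl hge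
          rw [show squoteEnd cs cs.length i = i by
            rw [squoteEnd, dif_pos h, if_pos ⟨hq, hor⟩]]
          rw [pvSlice_nil]
          simp
      · rw [if_neg (by simp only [beq_iff_eq]; exact hq)]
        rw [(ih (i + 1) (by omega)).1 T b (buf ++ [cs.getD i ' '])]
        rw [show squoteEnd cs cs.length i = squoteEnd cs cs.length (i + 1) by
          rw [squoteEnd, dif_pos h, if_neg (by rintro ⟨h1, -⟩; exact hq h1)]]
        rw [pvSlice_cons h (squoteEnd_ge cs cs.length (i + 1))]
        simp
    · -- squoteq
      intro T b buf
      rw [drop_cons_getD h]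
      simp only [List.foldl_cons, stepB]
      by_cases hw : wsChar (cs.getD i ' ')
      · rw [if_pos hw, if_neg (by rintro ⟨-, hx⟩; exact hx hw)]
        rw [to_Rrun cs (i + 1) (T ++ [String.ofList buf]) _ [] (by rw [bolA_succ, char_beq_decide])]
        rw [← Rrun_ws_step h hw]
      · rw [if_neg hw, if_pos (show i < cs.length ∧ ¬ wsChar (cs.getD i ' ') = true from ⟨h, hw⟩)]
        by_cases hq : cs.getD i ' ' = '\''
        · rw [if_pos (by simp only [beq_iff_eq]; exact hq)]
          by_cases hC : i + 1 < cs.length ∧ ¬ wsChar (cs.getD (i + 1) ' ')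
          · rw [(ih (i + 1) (by omega)).2 T b (buf ++ ['\'']), if_pos hC]
            rw [show squoteEnd cs cs.length i = squoteEnd cs cs.length (i + 1) by
              rw [squoteEnd, dif_pos h, if_neg (by rintro ⟨-, h2 | h2⟩ <;> [omega; exact hC.2 h2])]]
            rw [pvSlice_cons h (squoteEnd_ge cs cs.length (i + 1)), hq]
            simp
          · rw [(ih (i + 1) (by omega)).2 T b (buf ++ ['\'']), if_neg hC]
            rw [show squoteEnd cs cs.length i = i by
              rw [squoteEnd, dif_pos h, if_pos ⟨hq, by
                rcases Nat.lt_or_ge (i + 1) cs.length with hlt | hge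
                · by_cases hw2 : wsChar (cs.getD (i + 1) ' ') = true
                  · exact Or.inr hw2
                  · exact absurd ⟨hlt, hw2⟩ hC
                · exact Or.inl hge⟩]]
            rw [pvSlice_nil]
        · rw [if_neg (by simp only [beq_iff_eq]; exact hq)]
          rw [(ih (i + 1) (by omega)).1 T b (buf ++ ['\'', cs.getD i ' '])]
          rw [show squoteEnd cs cs.length i = squoteEnd cs cs.length (i + 1) by
            rw [squoteEnd, dif_pos h, if_neg (by rintro ⟨h1, -⟩; exact hq h1)]]
          rw [pvSlice_cons h (squoteEnd_ge cs cs.length (i + 1))]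
          simp
    · -- i ≥ length
      constructor
      · intro T b buf
        rw [List.drop_eq_nil_of_le (by omega), squoteEnd, dif_neg (by omega)]
        rw [Rrun_ge (by omega), pvSlice_nil]
        simp [finishB]
      · intro T b buf
        rw [List.drop_eq_nil_of_le (by omega), if_neg (by omega)]
        rw [Rrun_ge (by omega)]
        simp [finishB]

-- semicolon block (semi) and its pending-newline companion (seminl), proved together
theorem L_semi_pair (cs : List Char) : ∀ (k i : Nat), cs.length - i ≤ k →
    (∀ (T : List String) (b : Bool) (buf : List Char),
      finishB ((cs.drop i).foldl stepB ⟨T, .semi, b, buf⟩) =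
        T ++ [PySem.Str.strip (String.ofList (buf ++ pvSlice cs i (semiEnd cs cs.length i)))] ++ Rrun cs (semiEnd cs cs.length i + 2)) ∧
    (∀ (T : List String) (b : Bool) (buf : List Char),
      finishB ((cs.drop i).foldl stepB ⟨T, .seminl, b, buf⟩) =
        if i < cs.length ∧ cs.getD i ' ' = ';' then
          T ++ [PySem.Str.strip (String.ofList buf)] ++ Rrun cs (i + 1)
        else
          T ++ [PySem.Str.strip (String.ofList (buf ++ '\n' :: pvSlice cs i (semiEnd cs cs.length i)))] ++ Rrun cs (semiEnd cs cs.length i + 2)) := by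
  intro k
  induction k with
  | zero =>
    intro i hk
    constructor
    · intro T b buf
      rw [List.drop_eq_nil_of_le (by omega), semiEnd, dif_neg (by omega)]
      rw [Rrun_ge (by omega), pvSlice_nil]
      simp [finishB]
    · intro T b buf
      rw [List.drop_eq_nil_of_le (by omega), if_neg (by omega)]
      rw [semiEnd, dif_neg (by omega), Rrun_ge (by omega), pvSlice_nil, strip_mk_append_nl]
      simp [finishB]
  | succ k ih =>
    intro i hk
    by_cases h : i < cs.length
    constructor
    · -- semi
      intro T b buf
      rw [drop_cons_getD h]
      simp only [List.foldl_cons, stepB]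
      by_cases hnl : cs.getD i ' ' = '\n'
      · rw [if_pos (by simp only [beq_iff_eq]; exact hnl)]
        by_cases hC : i + 1 < cs.length ∧ cs.getD (i + 1) ' ' = ';'
        · rw [(ih (i + 1) (by omega)).2 T b buf,
            if_pos (show i + 1 < cs.length ∧ cs.getD (i + 1) ' ' = ';' from hC)]
          rw [show semiEnd cs cs.length i = i by
            rw [semiEnd, dif_pos h, if_pos ⟨hnl, hC.1, hC.2⟩]]
          rw [pvSlice_nil]
          simp
        · rw [(ih (i + 1) (by omega)).2 T b buf, if_neg hC]
          rw [show semiEnd cs cs.length i = semiEnd cs cs.length (i + 1) by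
            rw [semiEnd, dif_pos h, if_neg (by rintro ⟨-, h2, h3⟩; exact hC ⟨h2, h3⟩)]]
          rw [pvSlice_cons h (semiEnd_ge cs cs.length (i + 1)), hnl]
      · rw [if_neg (by simp only [beq_iff_eq]; exact hnl)]
        rw [(ih (i + 1) (by omega)).1 T b (buf ++ [cs.getD i ' '])]
        rw [show semiEnd cs cs.length i = semiEnd cs cs.length (i + 1) by
          rw [semiEnd, dif_pos h, if_neg (by rintro ⟨h1, -⟩; exact hnl h1)]]
        rw [pvSlice_cons h (semiEnd_ge cs cs.length (i + 1))]
        simp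
    · -- seminl
      intro T b buf
      rw [drop_cons_getD h]
      simp only [List.foldl_cons, stepB]
      by_cases hsc : cs.getD i ' ' = ';'
      · rw [if_pos (by simp only [beq_iff_eq]; exact hsc)]
        rw [if_pos (show i < cs.length ∧ cs.getD i ' ' = ';' from ⟨h, hsc⟩)]
        rw [to_Rrun cs (i + 1) (T ++ [PySem.Str.strip (String.ofList buf)]) _ []
          (by rw [bolA_succ, hsc]; decide)]
      · rw [if_neg (by simp only [beq_iff_eq]; exact hsc)]
        rw [if_neg (show ¬ (i < cs.length ∧ cs.getD i ' ' = ';') from by rintro ⟨-, hx⟩; exact hsc hx)]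
        by_cases hnl : cs.getD i ' ' = '\n'
        · rw [if_pos (by simp only [beq_iff_eq]; exact hnl)]
          by_cases hC : i + 1 < cs.length ∧ cs.getD (i + 1) ' ' = ';'
          · rw [(ih (i + 1) (by omega)).2 T b (buf ++ ['\n']),
              if_pos (show i + 1 < cs.length ∧ cs.getD (i + 1) ' ' = ';' from hC)]
            rw [show semiEnd cs cs.length i = i by
              rw [semiEnd, dif_pos h, if_pos ⟨hnl, hC.1, hC.2⟩]]
            rw [pvSlice_nil]
          · rw [(ih (i + 1) (by omega)).2 T b (buf ++ ['\n']), if_neg hC]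
            rw [show semiEnd cs cs.length i = semiEnd cs cs.length (i + 1) by
              rw [semiEnd, dif_pos h, if_neg (by rintro ⟨-, h2, h3⟩; exact hC ⟨h2, h3⟩)]]
            rw [pvSlice_cons h (semiEnd_ge cs cs.length (i + 1)), hnl]
            simp
        · rw [if_neg (by simp only [beq_iff_eq]; exact hnl)]
          rw [(ih (i + 1) (by omega)).1 T b (buf ++ ['\n', cs.getD i ' '])]
          rw [show semiEnd cs cs.length i = semiEnd cs cs.length (i + 1) by
            rw [semiEnd, dif_pos h, if_neg (by rintro ⟨h1, -⟩; exact hnl h1)]]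
          rw [pvSlice_cons h (semiEnd_ge cs cs.length (i + 1))]
          simp
    · -- i ≥ length
      constructor
      · intro T b buf
        rw [List.drop_eq_nil_of_le (by omega), semiEnd, dif_neg (by omega)]
        rw [Rrun_ge (by omega), pvSlice_nil]
        simp [finishB]
      · intro T b buf
        rw [List.drop_eq_nil_of_le (by omega), if_neg (by omega)]
        rw [semiEnd, dif_neg (by omega), Rrun_ge (by omega), pvSlice_nil, strip_mk_append_nl]
        simp [finishB]

-- the main invariant: A's dispatch loop from i equals B's run from i between tokens
theorem main_loop (cs : List Char) : ∀ (k i : Nat), cs.length - i ≤ k → ∀ (T : List String),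
    loopA cs cs.length i T = T ++ Rrun cs i := by
  intro k
  induction k with
  | zero =>
    intro i hk T
    rw [loopA, dif_neg (by omega), Rrun_ge (by omega)]
    simp
  | succ k ih =>
    intro i hk T
    by_cases h : i < cs.length
    · rw [loopA, dif_pos h]
      by_cases hw : wsChar (cs.getD i ' ')
      · rw [dif_pos hw, ih (i + 1) (by omega) T, Rrun_ws_step h hw]
      · rw [dif_neg hw]
        have hRi : Rrun cs i = finishB ((cs.drop (i + 1)).foldl stepB
            (stepB ⟨[], .ws, bolA cs i, []⟩ (cs.getD i ' '))) := by
          rw [Rrun, drop_cons_getD h, List.foldl_cons]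
        by_cases hc : cs.getD i ' ' = '#'
        · rw [dif_pos hc]
          have hcc : commentEnd cs cs.length i = commentEnd cs cs.length (i + 1) := by
            rw [commentEnd, dif_pos h, if_neg (by simp only [hc]; decide)]
          rw [ih (commentEnd cs cs.length i)
            (by rw [hcc]; have := commentEnd_ge cs cs.length (i + 1); omega) T]
          rw [hRi]
          simp only [stepB, if_neg hw, if_pos (show (cs.getD i ' ' == '#') = true from by
            rw [hc]; decide)]
          rw [L_comment cs (cs.length - (i + 1)) (i + 1) (by omega) [] (bolA cs i) []]
          rw [hcc]
          rcases Nat.lt_or_ge (commentEnd cs cs.length (i + 1)) cs.length with hlt | hge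
          · rw [Rrun_ws_step hlt (by
              rw [commentEnd_stop cs cs.length (i + 1) hlt]; decide)]
            simp
          · rw [Rrun_ge (by omega), Rrun_ge (by omega)]
            simp
        · rw [dif_neg hc]
          by_cases hsemi : cs.getD i ' ' = ';' ∧ (i = 0 ∨ cs.getD (i - 1) ' ' = '\n')
          · rw [if_pos hsemi]
            have hb : bolA cs i = true := decide_eq_true hsemi.2
            rw [ih (semiEnd cs cs.length (i + 1) + 2)
              (by have := semiEnd_ge cs cs.length (i + 1); omega)]
            rw [hRi]
            simp only [stepB, if_neg hw, if_neg (show ¬ (cs.getD i ' ' == '#') = true from by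
              simp only [beq_iff_eq]; exact hc),
              if_pos (show ((cs.getD i ' ' == ';') && bolA cs i) = true from by
                rw [hsemi.1, hb]; decide)]
            rw [(L_semi_pair cs (cs.length - (i + 1)) (i + 1) (by omega)).1 [] (bolA cs i) []]
            simp
          · rw [if_neg hsemi]
            have hbneg : ((cs.getD i ' ' == ';') && bolA cs i) = false := by
              rw [← Bool.not_eq_true]
              simp only [Bool.and_eq_true, beq_iff_eq, bolA, decide_eq_true_eq]
              exact hsemi
            by_cases hq : cs.getD i ' ' = '\''
            · rw [if_pos hq]
              rw [ih (squoteEnd cs cs.length (i + 1) + 1)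
                (by have := squoteEnd_ge cs cs.length (i + 1); omega)]
              rw [hRi]
              simp only [stepB, if_neg hw, if_neg (show ¬ (cs.getD i ' ' == '#') = true from by
                simp only [beq_iff_eq]; exact hc), hbneg, Bool.false_eq_true, if_false,
                if_pos (show (cs.getD i ' ' == '\'') = true from by rw [hq]; decide)]
              rw [(L_squote_pair cs (cs.length - (i + 1)) (i + 1) (by omega)).1 [] (bolA cs i) []]
              simp
            · rw [if_neg hq]
              by_cases hd : cs.getD i ' ' = '"'
              · rw [if_pos hd]
                rw [ih (dquoteEnd cs cs.length (i + 1) + 1)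
                  (by have := dquoteEnd_ge cs cs.length (i + 1); omega)]
                rw [hRi]
                simp only [stepB, if_neg hw, if_neg (show ¬ (cs.getD i ' ' == '#') = true from by
                  simp only [beq_iff_eq]; exact hc), hbneg, Bool.false_eq_true, if_false,
                  if_neg (show ¬ (cs.getD i ' ' == '\'') = true from by
                    simp only [beq_iff_eq]; exact hq),
                  if_pos (show (cs.getD i ' ' == '"') = true from by rw [hd]; decide)]
                rw [L_dquote cs (cs.length - (i + 1)) (i + 1) (by omega) [] (bolA cs i) []]
                simp
              · rw [if_neg hd]
                have hbe : bareEnd cs cs.length i = bareEnd cs cs.length (i + 1) := by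
                  rw [bareEnd, dif_pos h, if_neg hw]
                rw [hbe, ih (bareEnd cs cs.length (i + 1))
                  (by have := bareEnd_ge cs cs.length (i + 1); omega)]
                rw [hRi]
                simp only [stepB, if_neg hw, if_neg (show ¬ (cs.getD i ' ' == '#') = true from by
                  simp only [beq_iff_eq]; exact hc), hbneg, Bool.false_eq_true, if_false,
                  if_neg (show ¬ (cs.getD i ' ' == '\'') = true from by
                    simp only [beq_iff_eq]; exact hq),
                  if_neg (show ¬ (cs.getD i ' ' == '"') = true from by
                    simp only [beq_iff_eq]; exact hd)]
                rw [L_bare cs (cs.length - (i + 1)) (i + 1) (by omega) [] (bolA cs i)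
                  [cs.getD i ' ']]
                rw [pvSlice_cons h (bareEnd_ge cs cs.length (i + 1))]
                simp
    · rw [loopA, dif_neg h, Rrun_ge (by omega)]
      simp

-- ===== VERDICT (by name: the statement is the Claim_ definition above) =====
theorem tokenize_cif_spec : Claim_equal_tokenize_cif := by
  intro text _
  unfold Spec_tokenize_cif tokenize_cif tokenize_cif_alt
  rw [main_loop text.toList text.toList.length 0 (by omega) []]
  rw [Rrun]
  simp [bolA]
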